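-- pv_equiv track=rewrite | github.com/shkwsk/AtCoder | practice/beginners_selection/python3/ABC085C.py | f
-- ===== SOURCE A (Python) =====
-- def f(N,Y):
--     for i in range(N+1):
--         for j in range(N+1):
--             k=N-i-j
--             if k < 0:
--                 break
--             if i+j+k == N and 10000*i + 5000*j + 1000*k == Y:
--                 x,y,z = i,j,k
--                 return x,y,z
--     return -1,-1,-1
-- ===== SOURCE B (Python) =====
-- def f(N, Y):
--     # O(N): for each bill-count i of 10000-yen, solve the linear equation for j directly.
--     # 10000*i + 5000*j + 1000*(N-i-j) == Y  <=>  4000*j == Y - 1000*N - 9000*i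
--     for i in range(N + 1):
--         rem = Y - 1000 * N - 9000 * i
--         if rem >= 0 and rem % 4000 == 0:
--             j = rem // 4000
--             if j <= N - i:
--                 return i, j, N - i - j
--     return -1, -1, -1
-- ===== Notes on version B (the rewrite author's own statement) =====
-- stated objective: faster
-- what changed: Replaced the inner brute-force scan over j by solving the linear equation 4000*j = Y - 1000*N - 9000*i directly for each i, turning the nested O(N^2) loop into a single O(N) pass.
import Mathlib
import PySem

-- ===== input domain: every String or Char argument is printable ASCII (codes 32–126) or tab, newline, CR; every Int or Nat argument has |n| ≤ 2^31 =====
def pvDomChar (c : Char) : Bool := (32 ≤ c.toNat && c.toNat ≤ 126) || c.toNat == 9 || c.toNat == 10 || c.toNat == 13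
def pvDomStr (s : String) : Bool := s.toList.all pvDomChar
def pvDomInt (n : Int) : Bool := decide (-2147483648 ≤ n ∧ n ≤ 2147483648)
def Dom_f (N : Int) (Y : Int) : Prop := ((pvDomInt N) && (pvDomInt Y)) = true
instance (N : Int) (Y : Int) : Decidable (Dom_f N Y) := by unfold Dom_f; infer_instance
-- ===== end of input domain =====

-- B replaces A's inner brute-force loop over j by solving the linear equation for j directly (O(N) instead of O(N^2)).

-- ===== PORT A =====
-- inner 'for j in range(N+1)' loop: fuel counts remaining j values; 'break' and 'return' yield none/some
def innerA (N Y i : Int) : Nat → Int → Option (List Int)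
  | 0, _ => none
  | fuel+1, j =>
    let k := N - i - j
    if k < 0 then none
    else if i + j + k = N ∧ 10000*i + 5000*j + 1000*k = Y then some [i, j, k]
    else innerA N Y i fuel (j+1)

-- outer 'for i in range(N+1)' loop
def outerA (N Y : Int) : Nat → Int → Option (List Int)
  | 0, _ => none
  | fuel+1, i =>
    match innerA N Y i (N+1).toNat 0 with
    | some r => some r
    | none => outerA N Y fuel (i+1)

def f (N : Int) (Y : Int) : List Int := (outerA N Y (N+1).toNat 0).getD [-1, -1, -1]

-- ===== PORT B =====
-- body of B's loop for one i: solve 4000*j = Y - 1000*N - 9000*i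
def altStep (N Y i : Int) : Option (List Int) :=
  if 0 ≤ Y - 1000*N - 9000*i ∧ PySem.Int.mod (Y - 1000*N - 9000*i) 4000 = 0 then
    if PySem.Int.floordiv (Y - 1000*N - 9000*i) 4000 ≤ N - i then
      some [i, PySem.Int.floordiv (Y - 1000*N - 9000*i) 4000,
            N - i - PySem.Int.floordiv (Y - 1000*N - 9000*i) 4000]
    else none
  else none

def altLoop (N Y : Int) : Nat → Int → Option (List Int)
  | 0, _ => none
  | fuel+1, i =>
    match altStep N Y i with
    | some r => some r
    | none => altLoop N Y fuel (i+1)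

def f_alt (N : Int) (Y : Int) : List Int := (altLoop N Y (N+1).toNat 0).getD [-1, -1, -1]

-- ===== PRECONDITION & SPEC =====
def Spec_f (N : Int) (Y : Int) (out : List Int) : Prop := out = f_alt N Y
instance (N : Int) (Y : Int) (out : List Int) : Decidable (Spec_f N Y out) := by unfold Spec_f; infer_instance

-- ===== CLAIM (what is proved, stated in full; the proofs are below) =====
def Claim_equal_f : Prop := ∀ (N : Int) (Y : Int), Dom_f N Y → Spec_f N Y (f N Y)

-- ===== LEMMAS AND PROOFS =====

-- closed form of A's inner loop: it returns some iff rem/4000 lies in the scanned window and below the break point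
theorem innerA_closed (N Y i : Int) : ∀ (fuel : Nat) (j : Int),
    innerA N Y i fuel j =
      (if (Y - 1000*N - 9000*i) % 4000 = 0 ∧ j ≤ (Y - 1000*N - 9000*i) / 4000 ∧
          (Y - 1000*N - 9000*i) / 4000 < j + (fuel : Int) ∧
          (Y - 1000*N - 9000*i) / 4000 ≤ N - i
       then some [i, (Y - 1000*N - 9000*i) / 4000, N - i - (Y - 1000*N - 9000*i) / 4000]
       else none) := by
  intro fuel
  induction fuel with
  | zero =>
    intro j
    simp only [innerA]
    rw [if_neg]
    omega
  | succ m ih =>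
    intro j
    rw [innerA]
    by_cases hk : N - i - j < 0
    · rw [if_pos hk, if_neg]
      omega
    · rw [if_neg hk]
      by_cases hc : i + j + (N - i - j) = N ∧ 10000*i + 5000*j + 1000*(N - i - j) = Y
      · rw [if_pos hc]
        have hj : j = (Y - 1000*N - 9000*i) / 4000 ∧ (Y - 1000*N - 9000*i) % 4000 = 0 := by omega
        rw [if_pos (by omega)]
        rw [hj.1]
      · rw [if_neg hc, ih (j+1)]
        apply if_congr _ rfl rfl
        constructor <;> intro h <;> refine ⟨h.1, ?_, ?_, h.2.2.2⟩ <;> omega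

theorem inner_eq_step (N Y i : Int) (hi : 0 ≤ i) :
    innerA N Y i (N+1).toNat 0 = altStep N Y i := by
  rw [innerA_closed]
  unfold altStep
  rw [PySem.Int.mod_eq_emod_of_pos (by norm_num), PySem.Int.floordiv_eq_ediv_of_pos (by norm_num)]
  by_cases h1 : 0 ≤ Y - 1000*N - 9000*i ∧ (Y - 1000*N - 9000*i) % 4000 = 0
  · rw [if_pos h1]
    by_cases h2 : (Y - 1000*N - 9000*i) / 4000 ≤ N - i
    · rw [if_pos h2, if_pos (by omega)]
    · rw [if_neg h2, if_neg (by omega)]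
  · rw [if_neg h1, if_neg (by omega)]

theorem outer_eq_alt (N Y : Int) : ∀ (fuel : Nat) (i : Int), 0 ≤ i →
    outerA N Y fuel i = altLoop N Y fuel i := by
  intro fuel
  induction fuel with
  | zero => intro i _; rfl
  | succ m ih =>
    intro i hi
    rw [outerA, altLoop, inner_eq_step N Y i hi]
    cases altStep N Y i with
    | some r => rfl
    | none => exact ih (i+1) (by omega)

-- ===== VERDICT (by name: the statement is the Claim_ definition above) =====
theorem f_spec : Claim_equal_f := by
  intro N Y _
  unfold Spec_f f f_alt
  rw [outer_eq_alt N Y _ 0 le_rfl]
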